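-- pv_equiv track=rewrite | github.com/afanty2021/Code2Video | tests/helpers/mock_objects.py | generate_transcript
-- ===== SOURCE A (Python) =====
-- def generate_transcript(topic: str, length: int = 100) -> str:
--     """生成转录文本"""
--     sentences = [
--         f"今天我们学习{topic}的基础知识。",
--         f"{topic}是这个领域的核心概念。",
--         "让我们通过具体的例子来理解。",
--         "这个概念在实际应用中非常重要。",
--         "大家要重点掌握基本原理和方法。"
--     ]
--
--     transcript = ""
--     for i in range(length):
--         transcript += sentences[i % len(sentences)] + "\n"
--
--     return transcript
-- ===== SOURCE B (Python) =====
-- def generate_transcript(topic: str, length: int = 100) -> str: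
--     parts = [
--         f"今天我们学习{topic}的基础知识。\n",
--         f"{topic}是这个领域的核心概念。\n",
--         "让我们通过具体的例子来理解。\n",
--         "这个概念在实际应用中非常重要。\n",
--         "大家要重点掌握基本原理和方法。\n",
--     ]
--     n = max(length, 0)
--     full, rem = divmod(n, 5)
--     return "".join(parts) * full + "".join(parts[:rem])
-- ===== Notes on version B (the rewrite author's own statement) =====
-- stated objective: simpler
-- what changed: Replaces the length-long loop with modulo indexing by joining the five sentences once into a block and returning block * (n // 5) plus a join of the first n % 5 parts, with n = max(length, 0).
import Mathlib
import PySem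

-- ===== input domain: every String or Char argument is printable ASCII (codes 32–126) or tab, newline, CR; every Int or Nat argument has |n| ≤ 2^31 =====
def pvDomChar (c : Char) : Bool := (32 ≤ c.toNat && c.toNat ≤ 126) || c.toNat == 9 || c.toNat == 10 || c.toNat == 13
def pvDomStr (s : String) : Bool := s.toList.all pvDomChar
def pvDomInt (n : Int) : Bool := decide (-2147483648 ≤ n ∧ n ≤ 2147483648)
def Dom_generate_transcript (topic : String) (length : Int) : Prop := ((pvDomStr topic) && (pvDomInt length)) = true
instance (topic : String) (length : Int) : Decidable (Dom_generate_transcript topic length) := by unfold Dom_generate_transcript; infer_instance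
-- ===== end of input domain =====

-- B replaces A's length-long loop with modulo indexing by one join of a 5-sentence block,
-- string multiplication for the full cycles and a short remainder join (objective: simpler).

-- ===== PORT A =====
-- 'for i in range(length): transcript += sentences[i % len(sentences)] + "\n"'.
-- i % 5 always lies in [0, 5), so the pyGetD default is a totality guard only (Python never raises here).
def generate_transcript (topic : String) (length : Int) : String :=
  let sentences : List String :=
    ["今天我们学习" ++ topic ++ "的基础知识。",
     topic ++ "是这个领域的核心概念。",
     "让我们通过具体的例子来理解。",
     "这个概念在实际应用中非常重要。",
     "大家要重点掌握基本原理和方法。"]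
  (PySem.List.pyRange 0 length 1).foldl
    (fun transcript i =>
      transcript ++ PySem.List.pyGetD sentences (PySem.Int.mod i (sentences.length : Int)) "" ++ "\n")
    ""

-- ===== PORT B =====
-- hand port of '"".join(ps)' (exact: concatenation of the strings in order, empty separator)
def joinAll (ps : List String) : String := ps.foldl (· ++ ·) ""

-- hand port of Python 'block * full' (exact for full ≥ 0: full concatenated copies; here full ≥ 0 since n = max(length, 0))
def strMul (s : String) : Nat → String
  | 0 => ""
  | k + 1 => s ++ strMul s k

def generate_transcript_alt (topic : String) (length : Int) : String :=
  let parts : List String :=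
    ["今天我们学习" ++ topic ++ "的基础知识。\n",
     topic ++ "是这个领域的核心概念。\n",
     "让我们通过具体的例子来理解。\n",
     "这个概念在实际应用中非常重要。\n",
     "大家要重点掌握基本原理和方法。\n"]
  let n : Int := max length 0
  let fr := (PySem.Int.divmod? n 5).getD (0, 0)
  strMul (joinAll parts) fr.1.toNat ++ joinAll (PySem.List.slice parts none (some fr.2))

-- ===== PRECONDITION & SPEC =====
def Spec_generate_transcript (topic : String) (length : Int) (out : String) : Prop := out = generate_transcript_alt topic length
instance (topic : String) (length : Int) (out : String) : Decidable (Spec_generate_transcript topic length out) := by unfold Spec_generate_transcript; infer_instance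

-- ===== CLAIM (what is proved, stated in full; the proofs are below) =====
def Claim_equal_generate_transcript : Prop := ∀ (topic : String) (length : Int), Dom_generate_transcript topic length → Spec_generate_transcript topic length (generate_transcript topic length)

-- ===== LEMMAS AND PROOFS =====

theorem foldl_str : ∀ (xs : List String) (init : String),
    xs.foldl (· ++ ·) init = init ++ xs.foldl (· ++ ·) ""
  | [], init => by rw [List.foldl_nil, List.foldl_nil, String.append_empty]
  | x :: xs, init => by
    rw [List.foldl_cons, List.foldl_cons, foldl_str xs (init ++ x), foldl_str xs ("" ++ x),
      String.empty_append, String.append_assoc]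

theorem joinAll_cons (x : String) (xs : List String) : joinAll (x :: xs) = x ++ joinAll xs := by
  unfold joinAll
  rw [List.foldl_cons, foldl_str xs ("" ++ x), String.empty_append]

theorem joinAll_append (xs ys : List String) : joinAll (xs ++ ys) = joinAll xs ++ joinAll ys := by
  unfold joinAll
  rw [List.foldl_append, foldl_str ys (xs.foldl (· ++ ·) "")]

theorem foldl_acc_join (α : Type) (g : α → String) :
    ∀ (xs : List α) (init : String),
      xs.foldl (fun a x => a ++ g x) init = init ++ joinAll (xs.map g)
  | [], init => by simp [joinAll]
  | x :: xs, init => by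
    rw [List.foldl_cons, List.map_cons, foldl_acc_join α g xs (init ++ g x), joinAll_cons,
      String.append_assoc]

theorem strMul_succ_right (s : String) (k : Nat) : strMul s (k + 1) = s ++ strMul s k := rfl

-- the cyclic concatenation: full 5-blocks plus a remainder prefix
theorem cyc_spec (p0 p1 p2 p3 p4 : String) : ∀ (m : Nat),
    joinAll ((List.range m).map (fun k => ([p0, p1, p2, p3, p4].getD (k % 5) ""))) =
      strMul (joinAll [p0, p1, p2, p3, p4]) (m / 5) ++
        joinAll ([p0, p1, p2, p3, p4].take (m % 5)) := by
  intro m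
  induction m using Nat.strong_induction_on with
  | _ m ih =>
    by_cases h : m < 5
    · interval_cases m <;>
        simp [joinAll, strMul, List.range_succ, String.empty_append, String.append_empty,
          String.append_assoc]
    · obtain ⟨k, rfl⟩ : ∃ k, m = 5 + k := ⟨m - 5, by omega⟩
      rw [List.range_add, List.map_append, joinAll_append, List.map_map]
      have hmap : ((List.range k).map ((fun j => [p0, p1, p2, p3, p4].getD (j % 5) "") ∘ (5 + ·)))
          = (List.range k).map (fun j => [p0, p1, p2, p3, p4].getD (j % 5) "") := by
        apply List.map_congr_left
        intro j _
        have hj : (5 + j) % 5 = j % 5 := by omega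
        simp [hj]
      rw [hmap, ih k (by omega)]
      have hdiv : (5 + k) / 5 = k / 5 + 1 := by omega
      have hmod : (5 + k) % 5 = k % 5 := by omega
      rw [hdiv, hmod, strMul_succ_right, ← String.append_assoc]
      congr 1

theorem generate_transcript_spec : Claim_equal_generate_transcript := by
  intro topic length _
  unfold Spec_generate_transcript generate_transcript generate_transcript_alt
  dsimp only []
  set S : List String :=
    ["今天我们学习" ++ topic ++ "的基础知识。",
     topic ++ "是这个领域的核心概念。",
     "让我们通过具体的例子来理解。",
     "这个概念在实际应用中非常重要。",
     "大家要重点掌握基本原理和方法。"] with hS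
  set P : List String :=
    ["今天我们学习" ++ topic ++ "的基础知识。\n",
     topic ++ "是这个领域的核心概念。\n",
     "让我们通过具体的例子来理解。\n",
     "这个概念在实际应用中非常重要。\n",
     "大家要重点掌握基本原理和方法。\n"] with hP
  have hSlen : ((S.length : Nat) : Int) = 5 := by rw [hS]; rfl
  by_cases hneg : length ≤ 0
  · rw [PySem.List.pyRange_one_eq_nil hneg]
    have hmax : max length 0 = 0 := by omega
    rw [hmax]
    have hdm : (PySem.Int.divmod? (0 : Int) 5).getD (0, 0) = (0, 0) := by
      simp [PySem.Int.divmod?]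
    rw [hdm]
    have hsl : PySem.List.slice P none (some ((0 : Nat) : Int)) = P.take 0 :=
      PySem.List.slice_to_natCast ..
    simp only [Nat.cast_zero] at hsl
    rw [List.foldl_nil, hsl, List.take_zero]
    rfl
  · rw [not_le] at hneg
    obtain ⟨m, rfl⟩ : ∃ m : Nat, length = (m : Int) := ⟨length.toNat, by omega⟩
    have hmax : max (m : Int) 0 = (m : Int) := by omega
    rw [hmax]
    -- reduce A's loop to the cyclic concatenation
    rw [PySem.List.pyRange_one]
    have hsub : ((m : Int) - 0).toNat = m := by omega
    rw [hsub, List.foldl_map]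
    simp only [hSlen, String.append_assoc]
    rw [foldl_acc_join Nat
      (fun k : Nat => PySem.List.pyGetD S (PySem.Int.mod ((0 : Int) + (k : Int)) 5) "" ++ "\n")]
    rw [String.empty_append]
    have hmap : ((List.range m).map
        (fun k : Nat => PySem.List.pyGetD S (PySem.Int.mod ((0 : Int) + (k : Int)) 5) "" ++ "\n"))
        = (List.range m).map (fun k => P.getD (k % 5) "") := by
      apply List.map_congr_left
      intro k _
      have hm : PySem.Int.mod ((0 : Int) + (k : Int)) 5 = ((k % 5 : Nat) : Int) := by
        rw [zero_add]
        simp [PySem.Int.mod, Int.fmod_eq_emod]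
      rw [hm, PySem.List.pyGetD_natCast]
      have h5 : k % 5 < 5 := Nat.mod_lt _ (by omega)
      set r := k % 5 with hr
      have e0 : ("的基础知识。" : String) ++ "\n" = "的基础知识。\n" := rfl
      have e1 : ("是这个领域的核心概念。" : String) ++ "\n" = "是这个领域的核心概念。\n" := rfl
      interval_cases r <;> simp [hS, hP, String.append_assoc, e0, e1]
    rw [hmap, hP, cyc_spec]
    -- reduce B's arithmetic
    have hdm : (PySem.Int.divmod? (m : Int) 5).getD (0, 0)
        = ((m : Int).fdiv 5, (m : Int).fmod 5) := by
      simp [PySem.Int.divmod?]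
    rw [hdm]
    have h1 : ((m : Int).fdiv 5).toNat = m / 5 := by rw [Int.fdiv_eq_ediv]; omega
    have h2 : (m : Int).fmod 5 = ((m % 5 : Nat) : Int) := by rw [Int.fmod_eq_emod]; omega
    rw [h1, h2, PySem.List.slice_to_natCast]
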